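-- pv_equiv track=rewrite | github.com/scrapy/scrapy | tutorial-env/lib/python3.9/site-packages/docutils/utils/smartquotes.py | processEscapes
-- ===== SOURCE A (Python) =====
-- def processEscapes(text, restore=False):
--     r"""
--     Parameter:  String (unicode or bytes).
--     Returns:    The `text`, with after processing the following backslash
--                 escape sequences. This is useful if you want to force a "dumb"
--                 quote or other character to appear.
--
--                 Escape  Value
--                 ------  -----
--                 \\      &#92;
--                 \"      &#34;
--                 \'      &#39;
--                 \.      &#46;
--                 \-      &#45;
--                 \`      &#96;
--     """
--     replacements = ((r'\\', r'&#92;'),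
--                     (r'\"', r'&#34;'),
--                     (r"\'", r'&#39;'),
--                     (r'\.', r'&#46;'),
--                     (r'\-', r'&#45;'),
--                     (r'\`', r'&#96;'))
--     if restore:
--         for (ch, rep) in replacements:
--             text = text.replace(rep, ch[1])
--     else:
--         for (ch, rep) in replacements:
--             text = text.replace(ch, rep)
--
--     return text
-- ===== SOURCE B (Python) =====
-- def processEscapes(text, restore=False):
--     # Single left-to-right scan instead of six sequential .replace() passes.
--     entities = {'\\\\': '&#92;', '\\"': '&#34;', "\\'": '&#39;',
--                 '\\.': '&#46;', '\\-': '&#45;', '\\`': '&#96;'}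
--     out = []
--     i = 0
--     if restore:
--         rev = {v: k[1] for k, v in entities.items()}
--         while i < len(text):
--             chunk = text[i:i+5]
--             if chunk in rev:
--                 out.append(rev[chunk])
--                 i += 5
--             else:
--                 out.append(text[i])
--                 i += 1
--     else:
--         while i < len(text):
--             if text[i] == '\\' and i + 1 < len(text) and text[i+1] in '\\"\'.-`':
--                 out.append(entities[text[i:i+2]])
--                 i += 2
--             else:
--                 out.append(text[i])
--                 i += 1
--     return ''.join(out)
-- ===== Notes on version B (the rewrite author's own statement) =====
-- stated objective: alternative
-- what changed: A makes six sequential full-string str.replace passes (one per escape pair); B makes a single left-to-right scan that recognises every 2-char escape (or 5-char entity when restoring) in one traversal and builds the output once.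
import Mathlib
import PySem

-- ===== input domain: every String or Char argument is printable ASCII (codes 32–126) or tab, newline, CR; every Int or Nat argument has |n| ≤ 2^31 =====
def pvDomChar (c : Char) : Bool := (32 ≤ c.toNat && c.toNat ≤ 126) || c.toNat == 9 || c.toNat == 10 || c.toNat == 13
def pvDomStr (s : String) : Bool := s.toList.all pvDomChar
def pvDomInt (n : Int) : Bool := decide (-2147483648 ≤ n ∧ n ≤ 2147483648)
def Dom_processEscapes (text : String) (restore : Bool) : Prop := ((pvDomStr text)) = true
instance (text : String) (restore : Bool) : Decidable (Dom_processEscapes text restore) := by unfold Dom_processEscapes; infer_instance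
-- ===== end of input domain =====

-- B replaces A's six sequential str.replace passes by one left-to-right scan that handles
-- every escape/entity in a single traversal of the text (objective: alternative, one pass).


-- ===== PORT A =====
def pvReplacements : List (String × String) :=
  [("\\\\", "&#92;"), ("\\\"", "&#34;"), ("\\'", "&#39;"),
   ("\\.", "&#46;"), ("\\-", "&#45;"), ("\\`", "&#96;")]

def processEscapes (text : String) (restore : Bool) : String :=
  if restore then
    pvReplacements.foldl (fun t p =>
      match PySem.Str.pyGet? p.1 1 with          -- ch[1]
      | some c => PySem.Str.replace t p.2 (String.ofList [c])
      | none => t)                               -- unreachable: every ch literal has length 2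
      text
  else
    pvReplacements.foldl (fun t p => PySem.Str.replace t p.1 p.2) text

-- ===== PORT B =====
def pvEscEntity (d : Char) : List Char :=        -- entities['\\' + d]
  if d = '\\' then ['&','#','9','2',';']
  else if d = '"' then ['&','#','3','4',';']
  else if d = '\'' then ['&','#','3','9',';']
  else if d = '.' then ['&','#','4','6',';']
  else if d = '-' then ['&','#','4','5',';']
  else if d = '`' then ['&','#','9','6',';']
  else []

def pvIsEscCh (d : Char) : Bool :=               -- text[i+1] in '\\"\'.-`'
  d == '\\' || d == '"' || d == '\'' || d == '.' || d == '-' || d == '`'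

def pvScanEsc : List Char → List Char
  | [] => []
  | [c] => [c]
  | c :: d :: rest =>
    if c = '\\' ∧ pvIsEscCh d then pvEscEntity d ++ pvScanEsc rest
    else c :: pvScanEsc (d :: rest)

def pvRevEntity (chunk : List Char) : Option Char :=   -- rev lookup of text[i:i+5]
  if chunk = ['&','#','9','2',';'] then some '\\'
  else if chunk = ['&','#','3','4',';'] then some '"'
  else if chunk = ['&','#','3','9',';'] then some '\''
  else if chunk = ['&','#','4','6',';'] then some '.'
  else if chunk = ['&','#','4','5',';'] then some '-'
  else if chunk = ['&','#','9','6',';'] then some '`'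
  else none

def pvScanRes : List Char → List Char
  | [] => []
  | c :: rest =>
    match pvRevEntity ((c :: rest).take 5) with
    | some ch => ch :: pvScanRes ((c :: rest).drop 5)
    | none => c :: pvScanRes rest
termination_by l => l.length
decreasing_by all_goals (simp; try omega)

def processEscapes_alt (text : String) (restore : Bool) : String :=
  String.ofList (if restore then pvScanRes text.toList else pvScanEsc text.toList)

-- ===== PRECONDITION & SPEC =====
def Spec_processEscapes (text : String) (restore : Bool) (out : String) : Prop := out = processEscapes_alt text restore
instance (text : String) (restore : Bool) (out : String) : Decidable (Spec_processEscapes text restore out) := by unfold Spec_processEscapes; infer_instance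

-- ===== CLAIM (what is proved, stated in full; the proofs are below) =====
def Claim_equal_processEscapes : Prop := ∀ (text : String) (restore : Bool), Dom_processEscapes text restore → Spec_processEscapes text restore (processEscapes text restore)

-- ===== LEMMAS AND PROOFS =====
def pvRep (old new : List Char) : List Char → List Char
  | [] => []
  | c :: t => if old.isPrefixOf (c :: t) then new ++ pvRep old new (t.drop (old.length - 1))
              else c :: pvRep old new t
termination_by l => l.length
decreasing_by all_goals (simp; try omega)

lemma pvRep_go (old new : List Char) (h : old ≠ []) :
    ∀ fuel (l acc : List Char), l.length ≤ fuel →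
      PySem.Chars.replace.go old new fuel l acc = acc.reverse ++ pvRep old new l := by
  intro fuel
  induction fuel with
  | zero =>
    intro l acc hl
    have : l = [] := by cases l <;> simp_all
    subst this
    simp [PySem.Chars.replace.go, pvRep]
  | succ f ih =>
    intro l acc hl
    cases l with
    | nil => simp [PySem.Chars.replace.go, pvRep]
    | cons c t =>
      rw [PySem.Chars.replace.go]
      by_cases hp : old.isPrefixOf (c :: t)
      · rw [if_pos hp]
        obtain ⟨o, os, rfl⟩ : ∃ o os, old = o :: os := by cases old with | nil => exact absurd rfl h | cons o os => exact ⟨o, os, rfl⟩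
        have hdrop : (c :: t).drop (o :: os).length = t.drop ((o :: os).length - 1) := by simp
        rw [hdrop, ih _ _ (by simp at hl ⊢; omega)]
        rw [pvRep, if_pos hp]
        simp
      · rw [if_neg hp, ih _ _ (by simp at hl; omega)]
        rw [pvRep, if_neg hp]
        simp

lemma pvReplace_eq (s old new : List Char) (h : old ≠ []) :
    PySem.Chars.replace s old new = pvRep old new s := by
  rw [PySem.Chars.replace, if_neg (by simp [h]), pvRep_go old new h s.length s [] le_rfl]
  simp

lemma pvRep_cons_not_prefix {old : List Char} (new : List Char) {c : Char} {t : List Char}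
    (h : old.isPrefixOf (c :: t) = false) :
    pvRep old new (c :: t) = c :: pvRep old new t := by
  rw [pvRep, if_neg (by simp [h])]

lemma pvRep_cons_prefix {old : List Char} (new : List Char) {c : Char} {t : List Char}
    (h : old.isPrefixOf (c :: t) = true) :
    pvRep old new (c :: t) = new ++ pvRep old new (t.drop (old.length - 1)) := by
  rw [pvRep, if_pos h]

lemma pvRep_cons_ne_head {o : Char} (os new : List Char) {c : Char} (t : List Char) (h : c ≠ o) :
    pvRep (o :: os) new (c :: t) = c :: pvRep (o :: os) new t := by
  apply pvRep_cons_not_prefix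
  simp [List.isPrefixOf]
  intro h'; exact absurd h'.symm h

lemma pvRep2_cons₂_ne (a b : Char) (new : List Char) {c d : Char} (t : List Char) (hd : d ≠ b) :
    pvRep [a, b] new (c :: d :: t) = c :: pvRep [a, b] new (d :: t) := by
  apply pvRep_cons_not_prefix
  simp [List.isPrefixOf]
  intro _ h'; exact absurd h'.symm hd

lemma pvRep2_single (a b : Char) (new : List Char) (c : Char) :
    pvRep [a, b] new [c] = [c] := by
  rw [pvRep_cons_not_prefix new (by simp [List.isPrefixOf]), pvRep]

lemma pvIsPrefixOf_cons_cons (o c : Char) (os t : List Char) :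
    (o :: os).isPrefixOf (c :: t) = (o == c && os.isPrefixOf t) := by
  simp [List.isPrefixOf]

lemma pvPrefix_through (o : Char) (os : List Char) (e0 : Char) (es : List Char) :
    ∀ n (X : List Char), X.length ≤ n → ∀ q : List Char, (∀ c ∈ q, c ∉ (e0 :: es)) →
      q.isPrefixOf (pvRep (o :: os) (e0 :: es) X) = true → q.isPrefixOf X = true := by
  intro n
  induction n with
  | zero =>
    intro X hX q hq h
    have : X = [] := by cases X <;> simp_all
    subst this
    simpa [pvRep] using h
  | succ f ih =>
    intro X hX q hq h
    cases X with
    | nil => simpa [pvRep] using h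
    | cons c t =>
      cases hp : (o :: os).isPrefixOf (c :: t) with
      | true =>
        rw [pvRep_cons_prefix _ hp] at h
        cases q with
        | nil => simp [List.isPrefixOf]
        | cons a q' =>
          exfalso
          rw [List.cons_append, pvIsPrefixOf_cons_cons, Bool.and_eq_true] at h
          exact (hq a (by simp)) (by simp [(beq_iff_eq).mp h.1])
      | false =>
        rw [pvRep_cons_not_prefix _ hp] at h
        cases q with
        | nil => simp [List.isPrefixOf]
        | cons a q' =>
          rw [pvIsPrefixOf_cons_cons, Bool.and_eq_true] at h ⊢
          exact ⟨h.1, ih t (by simp at hX; omega) q' (fun x hx => hq x (by simp [hx])) h.2⟩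

lemma pvNotPrefix_lift (q : List Char) (o : Char) (os : List Char) (e0 : Char) (es : List Char)
    (X : List Char) (hq : ∀ c ∈ q, c ∉ (e0 :: es)) (h : q.isPrefixOf X = false) :
    q.isPrefixOf (pvRep (o :: os) (e0 :: es) X) = false := by
  cases hB : q.isPrefixOf (pvRep (o :: os) (e0 :: es) X) with
  | false => rfl
  | true => exact absurd (pvPrefix_through o os e0 es X.length X le_rfl q hq hB) (by simp [h])

-- the composition of A's six replaces, escape direction (innermost = first replace)
def pvChainEsc (cs : List Char) : List Char :=
  pvRep ['\\','`'] ['&','#','9','6',';'] (pvRep ['\\','-'] ['&','#','4','5',';']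
    (pvRep ['\\','.'] ['&','#','4','6',';'] (pvRep ['\\','\''] ['&','#','3','9',';']
      (pvRep ['\\','"'] ['&','#','3','4',';'] (pvRep ['\\','\\'] ['&','#','9','2',';'] cs)))))

-- the composition of A's six replaces, restore direction
def pvChainRes (cs : List Char) : List Char :=
  pvRep ['&','#','9','6',';'] ['`'] (pvRep ['&','#','4','5',';'] ['-']
    (pvRep ['&','#','4','6',';'] ['.'] (pvRep ['&','#','3','9',';'] ['\'']
      (pvRep ['&','#','3','4',';'] ['"'] (pvRep ['&','#','9','2',';'] ['\\'] cs)))))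

lemma pvChainEsc_nil : pvChainEsc [] = [] := by simp [pvChainEsc, pvRep]

lemma pvChainEsc_single (c : Char) : pvChainEsc [c] = [c] := by
  simp only [pvChainEsc, pvRep2_single]

lemma pvChainEsc_cons_ne {c : Char} (t : List Char) (h : c ≠ '\\') :
    pvChainEsc (c :: t) = c :: pvChainEsc t := by
  simp only [pvChainEsc, pvRep_cons_ne_head _ _ _ h]

lemma pvChainEsc_cons₂_ne {d : Char} (t : List Char) (hd : pvIsEscCh d = false) :
    pvChainEsc ('\\' :: d :: t) = '\\' :: d :: pvChainEsc t := by
  simp [pvIsEscCh] at hd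
  obtain ⟨⟨⟨⟨⟨h1, h2⟩, h3⟩, h4⟩, h5⟩, h6⟩ := hd
  simp only [pvChainEsc,
    pvRep2_cons₂_ne _ _ _ _ h1, pvRep2_cons₂_ne _ _ _ _ h2, pvRep2_cons₂_ne _ _ _ _ h3,
    pvRep2_cons₂_ne _ _ _ _ h4, pvRep2_cons₂_ne _ _ _ _ h5, pvRep2_cons₂_ne _ _ _ _ h6,
    pvRep_cons_ne_head _ _ _ h1]

lemma pvChainEsc_esc {d : Char} (t : List Char) (hd : pvIsEscCh d = true) :
    pvChainEsc ('\\' :: d :: t) = pvEscEntity d ++ pvChainEsc t := by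
  simp [pvIsEscCh] at hd
  rcases hd with ((((rfl | rfl) | rfl) | rfl) | rfl) | rfl <;>
    simp [pvChainEsc, pvEscEntity, pvRep, List.isPrefixOf]

lemma pvScanEsc_cons_ne {d : Char} (t : List Char) (h : d ≠ '\\') :
    pvScanEsc (d :: t) = d :: pvScanEsc t := by
  cases t <;> simp [pvScanEsc, h]

lemma pvChainEsc_eq_scan : ∀ (n : Nat) (cs : List Char), cs.length ≤ n → pvChainEsc cs = pvScanEsc cs := by
  intro n
  induction n with
  | zero =>
    intro cs h
    have : cs = [] := by cases cs <;> simp_all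
    subst this
    simp [pvChainEsc_nil, pvScanEsc]
  | succ f ih =>
    intro cs h
    match cs with
    | [] => simp [pvChainEsc_nil, pvScanEsc]
    | [c] => simp [pvChainEsc_single, pvScanEsc]
    | c :: d :: rest =>
      by_cases hc : c = '\\'
      · subst hc
        cases hd : pvIsEscCh d with
        | true =>
          rw [pvChainEsc_esc rest hd, pvScanEsc, if_pos ⟨rfl, hd⟩,
            ih rest (by simp at h; omega)]
        | false =>
          have hdne : d ≠ '\\' := by simp [pvIsEscCh] at hd; exact hd.1.1.1.1.1
          rw [pvChainEsc_cons₂_ne rest hd, pvScanEsc,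
            if_neg (by simp [hd]), pvScanEsc_cons_ne rest hdne,
            ih rest (by simp at h; omega)]
      · rw [pvChainEsc_cons_ne (d :: rest) hc, pvScanEsc, if_neg (by simp [hc]),
          ih (d :: rest) (by simp at h ⊢; omega)]

set_option maxRecDepth 8192 in
lemma pvChainRes_amp_none (rest : List Char)
    (h1 : List.isPrefixOf ['&','#','9','2',';'] ('&' :: rest) = false)
    (h2 : List.isPrefixOf ['&','#','3','4',';'] ('&' :: rest) = false)
    (h3 : List.isPrefixOf ['&','#','3','9',';'] ('&' :: rest) = false)
    (h4 : List.isPrefixOf ['&','#','4','6',';'] ('&' :: rest) = false)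
    (h5 : List.isPrefixOf ['&','#','4','5',';'] ('&' :: rest) = false)
    (h6 : List.isPrefixOf ['&','#','9','6',';'] ('&' :: rest) = false)
    : pvChainRes ('&' :: rest) = '&' :: pvChainRes rest := by
  have q1 : List.isPrefixOf ['#','9','2',';'] rest = false := by
    rw [pvIsPrefixOf_cons_cons] at h1; simpa using h1
  have q2 : List.isPrefixOf ['#','3','4',';'] rest = false := by
    rw [pvIsPrefixOf_cons_cons] at h2; simpa using h2
  have q3 : List.isPrefixOf ['#','3','9',';'] rest = false := by
    rw [pvIsPrefixOf_cons_cons] at h3; simpa using h3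
  have q4 : List.isPrefixOf ['#','4','6',';'] rest = false := by
    rw [pvIsPrefixOf_cons_cons] at h4; simpa using h4
  have q5 : List.isPrefixOf ['#','4','5',';'] rest = false := by
    rw [pvIsPrefixOf_cons_cons] at h5; simpa using h5
  have q6 : List.isPrefixOf ['#','9','6',';'] rest = false := by
    rw [pvIsPrefixOf_cons_cons] at h6; simpa using h6
  have G1 : List.isPrefixOf ['&','#','9','2',';'] ('&' :: rest) = false := by
    rw [pvIsPrefixOf_cons_cons]; simp [q1]
  have F2_1 : List.isPrefixOf ['#','3','4',';'] (pvRep ['&','#','9','2',';'] ['\\'] rest) = false :=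
    pvNotPrefix_lift _ '&' ['#','9','2',';'] '\\' [] _ (by simp) q2
  have G2 : List.isPrefixOf ['&','#','3','4',';'] ('&' :: (pvRep ['&','#','9','2',';'] ['\\'] rest)) = false := by
    rw [pvIsPrefixOf_cons_cons]; simp [F2_1]
  have F3_1 : List.isPrefixOf ['#','3','9',';'] (pvRep ['&','#','9','2',';'] ['\\'] rest) = false :=
    pvNotPrefix_lift _ '&' ['#','9','2',';'] '\\' [] _ (by simp) q3
  have F3_2 : List.isPrefixOf ['#','3','9',';'] (pvRep ['&','#','3','4',';'] ['\"'] (pvRep ['&','#','9','2',';'] ['\\'] rest)) = false :=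
    pvNotPrefix_lift _ '&' ['#','3','4',';'] '\"' [] _ (by simp) F3_1
  have G3 : List.isPrefixOf ['&','#','3','9',';'] ('&' :: (pvRep ['&','#','3','4',';'] ['\"'] (pvRep ['&','#','9','2',';'] ['\\'] rest))) = false := by
    rw [pvIsPrefixOf_cons_cons]; simp [F3_2]
  have F4_1 : List.isPrefixOf ['#','4','6',';'] (pvRep ['&','#','9','2',';'] ['\\'] rest) = false :=
    pvNotPrefix_lift _ '&' ['#','9','2',';'] '\\' [] _ (by simp) q4
  have F4_2 : List.isPrefixOf ['#','4','6',';'] (pvRep ['&','#','3','4',';'] ['\"'] (pvRep ['&','#','9','2',';'] ['\\'] rest)) = false :=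
    pvNotPrefix_lift _ '&' ['#','3','4',';'] '\"' [] _ (by simp) F4_1
  have F4_3 : List.isPrefixOf ['#','4','6',';'] (pvRep ['&','#','3','9',';'] ['\''] (pvRep ['&','#','3','4',';'] ['\"'] (pvRep ['&','#','9','2',';'] ['\\'] rest))) = false :=
    pvNotPrefix_lift _ '&' ['#','3','9',';'] '\'' [] _ (by simp) F4_2
  have G4 : List.isPrefixOf ['&','#','4','6',';'] ('&' :: (pvRep ['&','#','3','9',';'] ['\''] (pvRep ['&','#','3','4',';'] ['\"'] (pvRep ['&','#','9','2',';'] ['\\'] rest)))) = false := by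
    rw [pvIsPrefixOf_cons_cons]; simp [F4_3]
  have F5_1 : List.isPrefixOf ['#','4','5',';'] (pvRep ['&','#','9','2',';'] ['\\'] rest) = false :=
    pvNotPrefix_lift _ '&' ['#','9','2',';'] '\\' [] _ (by simp) q5
  have F5_2 : List.isPrefixOf ['#','4','5',';'] (pvRep ['&','#','3','4',';'] ['\"'] (pvRep ['&','#','9','2',';'] ['\\'] rest)) = false :=
    pvNotPrefix_lift _ '&' ['#','3','4',';'] '\"' [] _ (by simp) F5_1
  have F5_3 : List.isPrefixOf ['#','4','5',';'] (pvRep ['&','#','3','9',';'] ['\''] (pvRep ['&','#','3','4',';'] ['\"'] (pvRep ['&','#','9','2',';'] ['\\'] rest))) = false :=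
    pvNotPrefix_lift _ '&' ['#','3','9',';'] '\'' [] _ (by simp) F5_2
  have F5_4 : List.isPrefixOf ['#','4','5',';'] (pvRep ['&','#','4','6',';'] ['.'] (pvRep ['&','#','3','9',';'] ['\''] (pvRep ['&','#','3','4',';'] ['\"'] (pvRep ['&','#','9','2',';'] ['\\'] rest)))) = false :=
    pvNotPrefix_lift _ '&' ['#','4','6',';'] '.' [] _ (by simp) F5_3
  have G5 : List.isPrefixOf ['&','#','4','5',';'] ('&' :: (pvRep ['&','#','4','6',';'] ['.'] (pvRep ['&','#','3','9',';'] ['\''] (pvRep ['&','#','3','4',';'] ['\"'] (pvRep ['&','#','9','2',';'] ['\\'] rest))))) = false := by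
    rw [pvIsPrefixOf_cons_cons]; simp [F5_4]
  have F6_1 : List.isPrefixOf ['#','9','6',';'] (pvRep ['&','#','9','2',';'] ['\\'] rest) = false :=
    pvNotPrefix_lift _ '&' ['#','9','2',';'] '\\' [] _ (by simp) q6
  have F6_2 : List.isPrefixOf ['#','9','6',';'] (pvRep ['&','#','3','4',';'] ['\"'] (pvRep ['&','#','9','2',';'] ['\\'] rest)) = false :=
    pvNotPrefix_lift _ '&' ['#','3','4',';'] '\"' [] _ (by simp) F6_1
  have F6_3 : List.isPrefixOf ['#','9','6',';'] (pvRep ['&','#','3','9',';'] ['\''] (pvRep ['&','#','3','4',';'] ['\"'] (pvRep ['&','#','9','2',';'] ['\\'] rest))) = false :=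
    pvNotPrefix_lift _ '&' ['#','3','9',';'] '\'' [] _ (by simp) F6_2
  have F6_4 : List.isPrefixOf ['#','9','6',';'] (pvRep ['&','#','4','6',';'] ['.'] (pvRep ['&','#','3','9',';'] ['\''] (pvRep ['&','#','3','4',';'] ['\"'] (pvRep ['&','#','9','2',';'] ['\\'] rest)))) = false :=
    pvNotPrefix_lift _ '&' ['#','4','6',';'] '.' [] _ (by simp) F6_3
  have F6_5 : List.isPrefixOf ['#','9','6',';'] (pvRep ['&','#','4','5',';'] ['-'] (pvRep ['&','#','4','6',';'] ['.'] (pvRep ['&','#','3','9',';'] ['\''] (pvRep ['&','#','3','4',';'] ['\"'] (pvRep ['&','#','9','2',';'] ['\\'] rest))))) = false :=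
    pvNotPrefix_lift _ '&' ['#','4','5',';'] '-' [] _ (by simp) F6_4
  have G6 : List.isPrefixOf ['&','#','9','6',';'] ('&' :: (pvRep ['&','#','4','5',';'] ['-'] (pvRep ['&','#','4','6',';'] ['.'] (pvRep ['&','#','3','9',';'] ['\''] (pvRep ['&','#','3','4',';'] ['\"'] (pvRep ['&','#','9','2',';'] ['\\'] rest)))))) = false := by
    rw [pvIsPrefixOf_cons_cons]; simp [F6_5]
  simp only [pvChainRes]
  rw [pvRep_cons_not_prefix _ G1]
  rw [pvRep_cons_not_prefix _ G2]
  rw [pvRep_cons_not_prefix _ G3]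
  rw [pvRep_cons_not_prefix _ G4]
  rw [pvRep_cons_not_prefix _ G5]
  rw [pvRep_cons_not_prefix _ G6]
lemma pvChainRes_m1 (t : List Char) :
    pvChainRes ('&' :: '#' :: '9' :: '2' :: ';' :: t) = '\\' :: pvChainRes t := by
  simp [pvChainRes, pvRep, List.isPrefixOf]
lemma pvChainRes_m2 (t : List Char) :
    pvChainRes ('&' :: '#' :: '3' :: '4' :: ';' :: t) = '\"' :: pvChainRes t := by
  simp [pvChainRes, pvRep, List.isPrefixOf]
lemma pvChainRes_m3 (t : List Char) :
    pvChainRes ('&' :: '#' :: '3' :: '9' :: ';' :: t) = '\'' :: pvChainRes t := by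
  simp [pvChainRes, pvRep, List.isPrefixOf]
lemma pvChainRes_m4 (t : List Char) :
    pvChainRes ('&' :: '#' :: '4' :: '6' :: ';' :: t) = '.' :: pvChainRes t := by
  simp [pvChainRes, pvRep, List.isPrefixOf]
lemma pvChainRes_m5 (t : List Char) :
    pvChainRes ('&' :: '#' :: '4' :: '5' :: ';' :: t) = '-' :: pvChainRes t := by
  simp [pvChainRes, pvRep, List.isPrefixOf]
lemma pvChainRes_m6 (t : List Char) :
    pvChainRes ('&' :: '#' :: '9' :: '6' :: ';' :: t) = '`' :: pvChainRes t := by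
  simp [pvChainRes, pvRep, List.isPrefixOf]

lemma pvChainRes_nil : pvChainRes [] = [] := by simp [pvChainRes, pvRep]

lemma pvChainRes_cons_ne {c : Char} (t : List Char) (h : c ≠ '&') :
    pvChainRes (c :: t) = c :: pvChainRes t := by
  simp only [pvChainRes, pvRep_cons_ne_head _ _ _ h]

lemma pvRevEntity_take_none (cs : List Char)
    (h1 : List.isPrefixOf ['&','#','9','2',';'] cs = false)
    (h2 : List.isPrefixOf ['&','#','3','4',';'] cs = false)
    (h3 : List.isPrefixOf ['&','#','3','9',';'] cs = false)
    (h4 : List.isPrefixOf ['&','#','4','6',';'] cs = false)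
    (h5 : List.isPrefixOf ['&','#','4','5',';'] cs = false)
    (h6 : List.isPrefixOf ['&','#','9','6',';'] cs = false)
    : pvRevEntity (cs.take 5) = none := by
  have key : ∀ p : List Char, cs.take 5 = p → List.isPrefixOf p cs = true := by
    intro p hp
    exact List.isPrefixOf_iff_prefix.mpr (hp ▸ List.take_prefix 5 cs)
  unfold pvRevEntity
  split_ifs with w1 w2 w3 w4 w5 w6
  · exact absurd (key _ w1) (by simp [h1])
  · exact absurd (key _ w2) (by simp [h2])
  · exact absurd (key _ w3) (by simp [h3])
  · exact absurd (key _ w4) (by simp [h4])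
  · exact absurd (key _ w5) (by simp [h5])
  · exact absurd (key _ w6) (by simp [h6])
  · rfl

lemma pvChainRes_eq_scan : ∀ (n : Nat) (cs : List Char), cs.length ≤ n → pvChainRes cs = pvScanRes cs := by
  intro n
  induction n with
  | zero =>
    intro cs h
    have : cs = [] := by cases cs <;> simp_all
    subst this
    simp [pvChainRes_nil, pvScanRes]
  | succ f ih =>
    intro cs h
    cases cs with
    | nil => simp [pvChainRes_nil, pvScanRes]
    | cons c rest =>
      cases hp1 : List.isPrefixOf ['&','#','9','2',';'] (c :: rest) with
      | true =>
        obtain ⟨t, ht⟩ := List.isPrefixOf_iff_prefix.mp hp1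
        have hlen : t.length ≤ f := by rw [← ht] at h; simp at h; omega
        rw [← ht]
        simp only [List.cons_append, List.nil_append]
        rw [pvChainRes_m1 t, pvScanRes]
        simp only [List.take_succ_cons, List.drop_succ_cons, List.drop_zero, List.take_zero]
        rw [show pvRevEntity ['&','#','9','2',';'] = some _ from rfl]
        exact congrArg _ (ih t hlen)
      | false =>
        cases hp2 : List.isPrefixOf ['&','#','3','4',';'] (c :: rest) with
        | true =>
          obtain ⟨t, ht⟩ := List.isPrefixOf_iff_prefix.mp hp2
          have hlen : t.length ≤ f := by rw [← ht] at h; simp at h; omega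
          rw [← ht]
          simp only [List.cons_append, List.nil_append]
          rw [pvChainRes_m2 t, pvScanRes]
          simp only [List.take_succ_cons, List.drop_succ_cons, List.drop_zero, List.take_zero]
          rw [show pvRevEntity ['&','#','3','4',';'] = some _ from rfl]
          exact congrArg _ (ih t hlen)
        | false =>
          cases hp3 : List.isPrefixOf ['&','#','3','9',';'] (c :: rest) with
          | true =>
            obtain ⟨t, ht⟩ := List.isPrefixOf_iff_prefix.mp hp3
            have hlen : t.length ≤ f := by rw [← ht] at h; simp at h; omega
            rw [← ht]
            simp only [List.cons_append, List.nil_append]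
            rw [pvChainRes_m3 t, pvScanRes]
            simp only [List.take_succ_cons, List.drop_succ_cons, List.drop_zero, List.take_zero]
            rw [show pvRevEntity ['&','#','3','9',';'] = some _ from rfl]
            exact congrArg _ (ih t hlen)
          | false =>
            cases hp4 : List.isPrefixOf ['&','#','4','6',';'] (c :: rest) with
            | true =>
              obtain ⟨t, ht⟩ := List.isPrefixOf_iff_prefix.mp hp4
              have hlen : t.length ≤ f := by rw [← ht] at h; simp at h; omega
              rw [← ht]
              simp only [List.cons_append, List.nil_append]
              rw [pvChainRes_m4 t, pvScanRes]
              simp only [List.take_succ_cons, List.drop_succ_cons, List.drop_zero, List.take_zero]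
              rw [show pvRevEntity ['&','#','4','6',';'] = some _ from rfl]
              exact congrArg _ (ih t hlen)
            | false =>
              cases hp5 : List.isPrefixOf ['&','#','4','5',';'] (c :: rest) with
              | true =>
                obtain ⟨t, ht⟩ := List.isPrefixOf_iff_prefix.mp hp5
                have hlen : t.length ≤ f := by rw [← ht] at h; simp at h; omega
                rw [← ht]
                simp only [List.cons_append, List.nil_append]
                rw [pvChainRes_m5 t, pvScanRes]
                simp only [List.take_succ_cons, List.drop_succ_cons, List.drop_zero, List.take_zero]
                rw [show pvRevEntity ['&','#','4','5',';'] = some _ from rfl]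
                exact congrArg _ (ih t hlen)
              | false =>
                cases hp6 : List.isPrefixOf ['&','#','9','6',';'] (c :: rest) with
                | true =>
                  obtain ⟨t, ht⟩ := List.isPrefixOf_iff_prefix.mp hp6
                  have hlen : t.length ≤ f := by rw [← ht] at h; simp at h; omega
                  rw [← ht]
                  simp only [List.cons_append, List.nil_append]
                  rw [pvChainRes_m6 t, pvScanRes]
                  simp only [List.take_succ_cons, List.drop_succ_cons, List.drop_zero, List.take_zero]
                  rw [show pvRevEntity ['&','#','9','6',';'] = some _ from rfl]
                  exact congrArg _ (ih t hlen)
                | false =>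
                  have hs : pvRevEntity ((c :: rest).take 5) = none :=
                    pvRevEntity_take_none _ hp1 hp2 hp3 hp4 hp5 hp6
                  have hlen : rest.length ≤ f := by simp at h; omega
                  rw [pvScanRes, hs]
                  by_cases hc : c = '&'
                  · subst hc
                    rw [pvChainRes_amp_none rest hp1 hp2 hp3 hp4 hp5 hp6]
                    exact congrArg _ (ih rest hlen)
                  · rw [pvChainRes_cons_ne rest hc]
                    exact congrArg _ (ih rest hlen)

theorem processEscapes_spec : Claim_equal_processEscapes := by
  unfold Claim_equal_processEscapes Spec_processEscapes
  intro text restore _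
  have hrep : ∀ (s n : List Char) (o0 : Char) (os : List Char),
      PySem.Chars.replace s (o0 :: os) n = pvRep (o0 :: os) n s :=
    fun s n o0 os => pvReplace_eq s _ n (by simp)
  cases restore with
  | false =>
    unfold processEscapes processEscapes_alt pvReplacements
    simp only [Bool.false_eq_true, if_false, List.foldl, PySem.Str.replace,
      String.toList_ofList,
      show ("\\\\" : String).toList = ['\\','\\'] from rfl,
      show ("\\\"" : String).toList = ['\\','"'] from rfl,
      show ("\\'" : String).toList = ['\\','\''] from rfl,
      show ("\\." : String).toList = ['\\','.'] from rfl,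
      show ("\\-" : String).toList = ['\\','-'] from rfl,
      show ("\\`" : String).toList = ['\\','`'] from rfl,
      show ("&#92;" : String).toList = ['&','#','9','2',';'] from rfl,
      show ("&#34;" : String).toList = ['&','#','3','4',';'] from rfl,
      show ("&#39;" : String).toList = ['&','#','3','9',';'] from rfl,
      show ("&#46;" : String).toList = ['&','#','4','6',';'] from rfl,
      show ("&#45;" : String).toList = ['&','#','4','5',';'] from rfl,
      show ("&#96;" : String).toList = ['&','#','9','6',';'] from rfl,
      hrep]
    have := pvChainEsc_eq_scan text.toList.length text.toList le_rfl
    simp only [pvChainEsc] at this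
    rw [this]
  | true =>
    unfold processEscapes processEscapes_alt pvReplacements
    simp only [if_true, List.foldl,
      show PySem.Str.pyGet? "\\\\" 1 = some '\\' from rfl,
      show PySem.Str.pyGet? "\\\"" 1 = some '"' from rfl,
      show PySem.Str.pyGet? "\\'" 1 = some '\'' from rfl,
      show PySem.Str.pyGet? "\\." 1 = some '.' from rfl,
      show PySem.Str.pyGet? "\\-" 1 = some '-' from rfl,
      show PySem.Str.pyGet? "\\`" 1 = some '`' from rfl,
      PySem.Str.replace, String.toList_ofList,
      show ("&#92;" : String).toList = ['&','#','9','2',';'] from rfl,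
      show ("&#34;" : String).toList = ['&','#','3','4',';'] from rfl,
      show ("&#39;" : String).toList = ['&','#','3','9',';'] from rfl,
      show ("&#46;" : String).toList = ['&','#','4','6',';'] from rfl,
      show ("&#45;" : String).toList = ['&','#','4','5',';'] from rfl,
      show ("&#96;" : String).toList = ['&','#','9','6',';'] from rfl,
      hrep]
    have := pvChainRes_eq_scan text.toList.length text.toList le_rfl
    simp only [pvChainRes] at this
    rw [this]
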